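-- pv_equiv track=rewrite | github.com/megadave66/BF-assembly-2 | assembler.py | extract_macros
-- ===== SOURCE A (Python) =====
-- def extract_macros(code):
--     macros = {}
--     output = []
--     i = 0
--
--     while i < len(code):
--         line = code[i].strip()
--         if line.startswith(".macro"):
--             parts = line.split()
--             if len(parts) < 2:
--                 raise ValueError("Macro name missing")
--             name = parts[1]
--             body = []
--             i += 1
--             while i < len(code):
--                 end_line = code[i].strip()
--                 if end_line.startswith(".endmacro"):
--                     break
--                 body.append(code[i])
--                 i += 1
--             if i >= len(code):
--                 raise ValueError(f"Missing .endmacro for {name}")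
--             macros[name] = body
--         else:
--             output.append(code[i])
--         i += 1
--
--     return macros, output
-- ===== SOURCE B (Python) =====
-- def extract_macros(code):
--     macros = {}
--     output = []
--     current = None
--     body = None
--     for line in code:
--         stripped = line.strip()
--         if current is None:
--             if stripped.startswith(".macro"):
--                 parts = stripped.split()
--                 if len(parts) < 2:
--                     raise ValueError("Macro name missing")
--                 current = parts[1]
--                 body = []
--             else:
--                 output.append(line)
--         else:
--             if stripped.startswith(".endmacro"):
--                 macros[current] = body
--                 current = None
--                 body = None
--             else:
--                 body.append(line)
--     if current is not None:
--         raise ValueError(f"Missing .endmacro for {current}")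
--     return macros, output
-- ===== Notes on version B (the rewrite author's own statement) =====
-- stated objective: simpler
-- what changed: Replaced A's index-based outer while loop with a nested inner while that scans ahead for '.endmacro' by a single for-loop over the lines carrying a 'current macro / body' state.
import Mathlib
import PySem

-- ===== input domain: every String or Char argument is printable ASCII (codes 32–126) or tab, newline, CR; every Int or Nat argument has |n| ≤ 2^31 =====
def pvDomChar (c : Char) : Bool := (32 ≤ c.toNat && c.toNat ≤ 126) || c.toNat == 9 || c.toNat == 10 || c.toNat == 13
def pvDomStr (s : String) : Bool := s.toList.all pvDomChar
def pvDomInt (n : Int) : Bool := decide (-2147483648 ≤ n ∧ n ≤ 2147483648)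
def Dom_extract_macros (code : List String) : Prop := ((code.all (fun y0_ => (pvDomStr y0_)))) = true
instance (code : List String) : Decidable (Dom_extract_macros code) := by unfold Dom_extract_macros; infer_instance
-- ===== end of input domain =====

-- B replaces A's nested index-based while loops with a single pass carrying an
-- explicit "inside a macro" state (simpler decomposition; same cost).
-- Both Pythons raise ValueError on the same malformed inputs; those are outside Pre_.

-- shared line tests (both Pythons write these inline; named here once)
def pvIsM (s : String) : Bool := PySem.Str.startswith (PySem.Str.strip s) ".macro"      -- line.strip().startswith(".macro")
def pvIsE (s : String) : Bool := PySem.Str.startswith (PySem.Str.strip s) ".endmacro"   -- line.strip().startswith(".endmacro")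

-- ===== PORT A =====
-- inner while loop of A: scan for a ".endmacro" line;
-- returns (body, rest after that line), none = the loop ran off the end (A raises)
def pvScanBody : List String → List String → Option (List String × List String)
  | [], _ => none
  | x :: rest, body => if pvIsE x then some (body, rest) else pvScanBody rest (body ++ [x])

-- A's outer while loop over the index i, as recursion on the remaining lines;
-- fuel = number of lines still allowed (each step consumes at least one line, so
-- fuel = code.length at entry suffices; the fuel only makes the recursion structural)
def pvGoA (fuel : Nat) (code : List String) (macros : PySem.Dict String (List String))
    (output : List String) : (List (String × List String)) × List String :=
  match fuel, code with
  | _, [] => (macros.items, output)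
  | 0, _ :: _ => (macros.items, output)  -- never reached from fuel = code.length
  | fuel + 1, c :: rest =>
    if pvIsM c then
      let parts := PySem.Str.split₀ (PySem.Str.strip c)
      if parts.length < 2 then (macros.items, output)  -- raise ValueError("Macro name missing")
      else
        let name := parts.getD 1 ""
        match pvScanBody rest [] with
        | none => (macros.items, output)               -- raise ValueError(f"Missing .endmacro for {name}")
        | some (body, rest') => pvGoA fuel rest' (macros.insert name body) output
    else pvGoA fuel rest macros (output ++ [c])

def extract_macros (code : List String) : (List (String × List String)) × List String :=
  pvGoA code.length code PySem.Dict.empty []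

-- ===== PORT B =====
-- single pass; state = none (top level) or some (current macro name, body so far)
def pvGoB (code : List String) (st : Option (String × List String))
    (macros : PySem.Dict String (List String)) (output : List String) :
    (List (String × List String)) × List String :=
  match code, st with
  | [], none => (macros.items, output)
  | [], some _ => (macros.items, output)               -- raise ValueError(f"Missing .endmacro for {current}")
  | line :: rest, none =>
    if pvIsM line then
      let parts := PySem.Str.split₀ (PySem.Str.strip line)
      if parts.length < 2 then (macros.items, output)  -- raise ValueError("Macro name missing")
      else pvGoB rest (some (parts.getD 1 "", [])) macros output
    else pvGoB rest none macros (output ++ [line])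
  | line :: rest, some (name, body) =>
    if pvIsE line then pvGoB rest none (macros.insert name body) output
    else pvGoB rest (some (name, body ++ [line])) macros output

def extract_macros_alt (code : List String) : (List (String × List String)) × List String :=
  pvGoB code none PySem.Dict.empty []

-- ===== PRECONDITION & SPEC =====
def pvHasName (s : String) : Bool := 2 ≤ (PySem.Str.split₀ (PySem.Str.strip s)).length

-- line i is at top level: every earlier ".macro" line has a ".endmacro" line strictly between
def pvTopLevel (code : List String) (i : Nat) : Bool :=
  (List.range i).all fun j =>
    !pvIsM (code.getD j "") || (List.range i).any fun k => decide (j < k) && pvIsE (code.getD k "")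

-- Pre_ excludes exactly the inputs on which the Python raises ValueError: a top-level
-- ".macro" line with no name token, or a top-level ".macro" line never followed by a
-- ".endmacro" line.
def Pre_extract_macros (code : List String) : Prop :=
  ((List.range code.length).all fun i =>
    !pvIsM (code.getD i "") || !pvTopLevel code i ||
      (pvHasName (code.getD i "") &&
        (List.range code.length).any fun k => decide (i < k) && pvIsE (code.getD k ""))) = true
instance (code : List String) : Decidable (Pre_extract_macros code) := by
  unfold Pre_extract_macros; infer_instance

def pvWitness_extract_macros : List String :=
  [".macro double", "  +  ", "+", ".endmacro", "> <"]

def Spec_extract_macros (code : List String) (out : (List (String × List String)) × List String) : Prop := out = extract_macros_alt code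
instance (code : List String) (out : (List (String × List String)) × List String) : Decidable (Spec_extract_macros code out) := by unfold Spec_extract_macros; infer_instance

-- ===== CLAIM (what is proved, stated in full; the proofs are below) =====
def Claim_equal_extract_macros : Prop := ∀ (code : List String), Dom_extract_macros code → Pre_extract_macros code → Spec_extract_macros code (extract_macros code)

-- ===== LEMMAS AND PROOFS =====

theorem pvScanBody_length : ∀ (xs body b r : List String),
    pvScanBody xs body = some (b, r) → r.length < xs.length := by
  intro xs
  induction xs with
  | nil => intro _ _ _ h; simp [pvScanBody] at h
  | cons x rest ih =>
    intro body b r h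
    by_cases hE : pvIsE x = true
    · simp [pvScanBody, hE] at h
      simp [← h.2]
    · simp [pvScanBody, hE] at h
      have := ih _ _ _ h
      simp; omega

-- B inside a macro = A's inner scan followed by B back at top level
theorem pvGoB_some : ∀ (code body : List String) (name : String)
    (macros : PySem.Dict String (List String)) (output : List String),
    pvGoB code (some (name, body)) macros output =
      match pvScanBody code body with
      | none => (macros.items, output)
      | some (b, r) => pvGoB r none (macros.insert name b) output := by
  intro code
  induction code with
  | nil => intro body name macros output; simp [pvGoB, pvScanBody]
  | cons line rest ih =>
    intro body name macros output
    by_cases hE : pvIsE line = true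
    · simp [pvGoB, pvScanBody, hE]
    · simp [pvGoB, pvScanBody, hE, ih]

theorem pvGoA_eq_pvGoB : ∀ (fuel : Nat) (code : List String)
    (macros : PySem.Dict String (List String)) (output : List String),
    code.length ≤ fuel → pvGoA fuel code macros output = pvGoB code none macros output := by
  intro fuel
  induction fuel with
  | zero =>
    intro code macros output h
    have : code = [] := List.eq_nil_of_length_eq_zero (by omega)
    subst this; simp [pvGoA, pvGoB]
  | succ n ih =>
    intro code macros output h
    cases code with
    | nil => simp [pvGoA, pvGoB]
    | cons c rest =>
      simp only [List.length_cons] at h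
      by_cases hM : pvIsM c = true
      · by_cases hP : (PySem.Str.split₀ (PySem.Str.strip c)).length < 2
        · simp [pvGoA, pvGoB, hM, hP]
        · rw [pvGoA, pvGoB]
          simp only [hM, if_true, hP, if_false]
          rw [pvGoB_some]
          cases hs : pvScanBody rest [] with
          | none => simp
          | some p =>
            obtain ⟨b, r⟩ := p
            have hr := pvScanBody_length rest [] b r hs
            exact ih r _ output (by omega)
      · rw [pvGoA, pvGoB]
        simp only [hM, Bool.false_eq_true, if_false]
        exact ih rest macros (output ++ [c]) (by omega)

-- ===== VERDICT (by name: the statement is the Claim_ definition above) =====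
theorem extract_macros_spec : Claim_equal_extract_macros := by
  intro code _ _
  unfold Spec_extract_macros extract_macros extract_macros_alt
  exact pvGoA_eq_pvGoB code.length code _ _ le_rfl
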